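-- pv_equiv track=rewrite | github.com/ryan3780/Algorithm-python | Task_1.py | solution
-- ===== SOURCE A (Python) =====
-- def solution(A):
--     # write your code in Python 3.6
--     evens = []
--     odds = []
--     for num in A:
--         if num % 2 == 0:
--             evens.append(num)
--         else:
--             odds.append(num)
--
--     ans = 0
--
--     if not evens:
--         ans = 0 + max(odds)
--     elif not odds:
--         ans = 0 + max(evens)
--     else:
--         ans = max(odds) + max(evens)
--
--     return ans
-- ===== SOURCE B (Python) =====
-- def solution(A):
--     # single pass keeping two running maxima instead of building parity lists
--     max_even = None
--     max_odd = None
--     for num in A: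
--         if num % 2 == 0:
--             if max_even is None or num > max_even:
--                 max_even = num
--         else:
--             if max_odd is None or num > max_odd:
--                 max_odd = num
--     if max_even is None and max_odd is None:
--         raise ValueError("max() arg is an empty sequence")
--     return (max_even if max_even is not None else 0) + (max_odd if max_odd is not None else 0)
-- ===== Notes on version B (the rewrite author's own statement) =====
-- stated objective: simpler
-- what changed: Replaces building two parity lists and calling max() on them with a single pass that maintains two running maxima in O(1) extra space.
import Mathlib
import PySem

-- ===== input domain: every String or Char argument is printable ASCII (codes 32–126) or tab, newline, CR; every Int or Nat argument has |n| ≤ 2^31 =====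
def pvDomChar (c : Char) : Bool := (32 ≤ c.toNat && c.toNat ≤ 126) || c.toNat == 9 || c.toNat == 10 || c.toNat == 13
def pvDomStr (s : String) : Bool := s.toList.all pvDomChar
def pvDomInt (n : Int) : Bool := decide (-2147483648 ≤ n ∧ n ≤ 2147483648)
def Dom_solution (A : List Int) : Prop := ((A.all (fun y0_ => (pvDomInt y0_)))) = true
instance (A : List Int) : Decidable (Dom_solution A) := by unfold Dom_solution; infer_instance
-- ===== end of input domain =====

-- B replaces A's two parity lists + max() calls with a single pass keeping two running maxima (simpler, O(1) extra space).


-- ===== PORT A =====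
def solution (A : List Int) : Int :=
  let eo := A.foldl (fun (p : List Int × List Int) num =>
    if PySem.Int.mod num 2 == 0 then (p.1 ++ [num], p.2) else (p.1, p.2 ++ [num])) ([], [])
  let evens := eo.1
  let odds := eo.2
  -- Python's max(l) raises on l = []; those inputs are excluded by Pre_solution (.getD 0 is never reached inside Pre_)
  if evens = [] then 0 + (PySem.List.max? odds (fun y => y)).getD 0
  else if odds = [] then 0 + (PySem.List.max? evens (fun y => y)).getD 0
  else (PySem.List.max? odds (fun y => y)).getD 0 + (PySem.List.max? evens (fun y => y)).getD 0

-- ===== PORT B =====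
def solution_alt (A : List Int) : Int :=
  let p := A.foldl (fun (p : Option Int × Option Int) num =>
    if PySem.Int.mod num 2 == 0 then
      ((match p.1 with | none => some num | some m => if num > m then some num else some m), p.2)
    else
      (p.1, (match p.2 with | none => some num | some m => if num > m then some num else some m)))
    (none, none)
  -- Python B raises on the (none, none) case, i.e. A = []; excluded by Pre_solution
  p.1.getD 0 + p.2.getD 0

-- ===== PRECONDITION & SPEC =====
-- Pre_ excludes the empty list, on which both Pythons raise ValueError.
def Pre_solution (A : List Int) : Prop := A ≠ []
instance (A : List Int) : Decidable (Pre_solution A) := by unfold Pre_solution; infer_instance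
def pvWitness_solution : List Int := [3, 4, -2]
def Spec_solution (A : List Int) (out : Int) : Prop := out = solution_alt A
instance (A : List Int) (out : Int) : Decidable (Spec_solution A out) := by unfold Spec_solution; infer_instance

-- ===== CLAIM (what is proved, stated in full; the proofs are below) =====
def Claim_equal_solution : Prop := ∀ (A : List Int), Dom_solution A → Pre_solution A → Spec_solution A (solution A)

-- ===== LEMMAS AND PROOFS =====

def pvCombOpt (m : Option Int) (num : Int) : Option Int :=
  match m with | none => some num | some v => if num > v then some num else some v

lemma pvCombOpt_some (m x : Int) : pvCombOpt (some m) x = some (max m x) := by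
  show (if x > m then some x else some m) = some (max m x)
  split_ifs with h <;> simp [max_def] <;> omega

lemma foldA_gen (q : Int → Bool) (l e o : List Int) :
    l.foldl (fun (p : List Int × List Int) num =>
      if q num then (p.1 ++ [num], p.2) else (p.1, p.2 ++ [num])) (e, o)
    = (e ++ l.filter q, o ++ l.filter (fun n => !q n)) := by
  induction l generalizing e o with
  | nil => simp
  | cons x t ih =>
    by_cases h : q x <;> simp [h, ih]

lemma foldB_gen (q : Int → Bool) (l : List Int) (me mo : Option Int) :
    l.foldl (fun (p : Option Int × Option Int) num =>
      if q num then
        ((match p.1 with | none => some num | some m => if num > m then some num else some m), p.2)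
      else
        (p.1, (match p.2 with | none => some num | some m => if num > m then some num else some m)))
      (me, mo)
    = ((l.filter q).foldl pvCombOpt me, (l.filter (fun n => !q n)).foldl pvCombOpt mo) := by
  induction l generalizing me mo with
  | nil => simp
  | cons x t ih =>
    by_cases h : q x <;> simp only [List.foldl, List.filter, h, if_pos,
      Bool.not_true, Bool.not_false, ih] <;> rfl

lemma foldl_comb_some (l : List Int) (m : Int) :
    l.foldl pvCombOpt (some m) = some (l.foldl max m) := by
  induction l generalizing m with
  | nil => rfl
  | cons x t ih => simp [List.foldl, pvCombOpt_some, ih]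

lemma comb_getD_eq_max? (l : List Int) :
    (l.foldl pvCombOpt none).getD 0 = (PySem.List.max? l (fun y => y)).getD 0 := by
  cases l with
  | nil =>
    have h : PySem.List.max? ([] : List Int) (fun y => y) = none := by
      cases hx : PySem.List.max? ([] : List Int) (fun y => y) with
      | none => rfl
      | some m => exact absurd (PySem.List.max?_mem hx) (by simp)
    simp [h]
  | cons x t =>
    show ((x :: t).foldl pvCombOpt none).getD 0 = _
    rw [List.foldl_cons, show pvCombOpt none x = some x from rfl, foldl_comb_some,
      PySem.List.max?_id_cons]

-- ===== VERDICT (by name: the statement is the Claim_ definition above) =====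
theorem solution_spec : Claim_equal_solution := by
  intro A _ _
  unfold Spec_solution solution solution_alt
  rw [foldA_gen (fun num => PySem.Int.mod num 2 == 0),
      foldB_gen (fun num => PySem.Int.mod num 2 == 0)]
  simp only [List.nil_append]
  by_cases he : A.filter (fun num => PySem.Int.mod num 2 == 0) = [] <;>
    by_cases ho : A.filter (fun n => !(fun num => PySem.Int.mod num 2 == 0) n) = [] <;>
      simp only [he, ho, if_pos, if_neg, not_false_iff, List.foldl_nil, ← comb_getD_eq_max?] <;>
      simp <;> omega
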